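-- pv_equiv track=rewrite | github.com/gkabasele/eavesdropping_case_study | bestPath.py | count_common_edges
-- ===== SOURCE A (Python) =====
-- def count_common_edges(paths):
--     edges = set()
--     common_edges = 0
--     for path in paths:
--         for i in range(0,len(path)-1):
--             if (path[i],path[i+1]) in edges:
--                 common_edges +=1
--             else:
--                 edges.add((path[i],path[i+1]))
--                 edges.add((path[i+1],path[i]))
--     return common_edges
-- ===== SOURCE B (Python) =====
-- def count_common_edges(paths):
--     counts = {}
--     for path in paths:
--         for u, v in zip(path, path[1:]):
--             k = (u, v) if u <= v else (v, u)
--             counts[k] = counts.get(k, 0) + 1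
--     return sum(counts.values()) - len(counts)
-- ===== Notes on version B (the rewrite author's own statement) =====
-- stated objective: alternative
-- what changed: Replaces the seen-set-with-branch single pass by a branch-free count table keyed by the normalized (min,max) edge, then returns total occurrences minus distinct edges in a second reduction pass.
import Mathlib
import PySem

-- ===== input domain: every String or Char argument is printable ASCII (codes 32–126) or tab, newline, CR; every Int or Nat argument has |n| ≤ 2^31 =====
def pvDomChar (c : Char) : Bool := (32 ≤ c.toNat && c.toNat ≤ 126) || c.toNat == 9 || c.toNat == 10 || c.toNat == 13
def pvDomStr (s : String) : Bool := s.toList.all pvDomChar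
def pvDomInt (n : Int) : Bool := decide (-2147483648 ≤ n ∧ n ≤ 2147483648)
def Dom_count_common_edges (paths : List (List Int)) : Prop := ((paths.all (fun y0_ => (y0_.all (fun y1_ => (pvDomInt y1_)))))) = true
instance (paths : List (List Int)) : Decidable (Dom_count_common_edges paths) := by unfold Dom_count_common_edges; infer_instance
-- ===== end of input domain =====

-- B replaces A's seen-set-with-branch pass by a branch-free count table keyed by the
-- normalized (min,max) edge, returning total occurrences minus distinct edges (alternative decomposition, same asymptotic cost).

-- ===== PORT A =====
-- A's loop state: (edges : set of directed pairs, common_edges : int); path[i] is read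
-- with pyGetD (the index i from range(0, len(path)-1) is always in range, so this is exact).
def count_common_edges (paths : List (List Int)) : Int :=
  (paths.foldl (fun (st : PySem.Set (Int × Int) × Int) path =>
      (PySem.List.pyRange 0 ((path.length : Int) - 1) 1).foldl (fun st i =>
        if st.1.contains (PySem.List.pyGetD path i 0, PySem.List.pyGetD path (i + 1) 0) then
          (st.1, st.2 + 1)
        else
          (PySem.Set.add
             (PySem.Set.add st.1 (PySem.List.pyGetD path i 0, PySem.List.pyGetD path (i + 1) 0))
             (PySem.List.pyGetD path (i + 1) 0, PySem.List.pyGetD path i 0),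
           st.2)) st)
    (PySem.Set.empty, 0)).2

-- ===== PORT B =====
-- k = (u, v) if u <= v else (v, u)
def pvNorm (uv : Int × Int) : Int × Int := if uv.1 ≤ uv.2 then uv else (uv.2, uv.1)

def count_common_edges_alt (paths : List (List Int)) : Int :=
  let counts := paths.foldl (fun (d : PySem.Dict (Int × Int) Int) path =>
      (path.zip (path.drop 1)).foldl (fun d uv =>
        d.insert (pvNorm uv) (d.getD (pvNorm uv) 0 + 1)) d)
    PySem.Dict.empty
  counts.values.sum - (counts.size : Int)

-- ===== PRECONDITION & SPEC =====
def Spec_count_common_edges (paths : List (List Int)) (out : Int) : Prop := out = count_common_edges_alt paths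
instance (paths : List (List Int)) (out : Int) : Decidable (Spec_count_common_edges paths out) := by unfold Spec_count_common_edges; infer_instance

-- ===== CLAIM (what is proved, stated in full; the proofs are below) =====
def Claim_equal_count_common_edges : Prop := ∀ (paths : List (List Int)), Dom_count_common_edges paths → Spec_count_common_edges paths (count_common_edges paths)

-- ===== LEMMAS AND PROOFS =====

-- A's loop body as a function of the current state and the directed edge it reads.
def pvAstep (st : PySem.Set (Int × Int) × Int) (e : Int × Int) : PySem.Set (Int × Int) × Int :=
  if st.1.contains e then (st.1, st.2 + 1)
  else (PySem.Set.add (PySem.Set.add st.1 e) (e.2, e.1), st.2)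

-- The consecutive pairs of a path, as read by A's index loop.
lemma pvPairs_eq (p : List Int) :
    (PySem.List.pyRange 0 ((p.length : Int) - 1) 1).map
      (fun i => (PySem.List.pyGetD p i 0, PySem.List.pyGetD p (i + 1) 0))
    = p.zip (p.drop 1) := by
  apply List.ext_getElem
  · simp [PySem.List.length_pyRange_one]
  · intro k h1 h2
    have hkl : k + 1 < p.length := by
      simp [PySem.List.length_pyRange_one] at h1
      omega
    simp [PySem.List.getElem_pyRange_one]
    constructor
    · rw [List.getElem?_eq_getElem (by omega)]
      simp
    · rw [show ((k : Int) + 1) = (((k + 1 : Nat)) : Int) by push_cast; ring,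
          PySem.List.pyGetD_natCast, List.getD_eq_getElem _ _ (by omega)]

-- pvNorm identifies exactly an edge and its reverse.
lemma pvNorm_eq_iff (e e' : Int × Int) :
    pvNorm e' = pvNorm e ↔ e' = e ∨ e' = (e.2, e.1) := by
  obtain ⟨a, b⟩ := e'
  obtain ⟨u, v⟩ := e
  simp only [pvNorm]
  split_ifs with h1 h2 h2 <;>
    simp only [Prod.mk.injEq] <;> constructor <;> rintro (⟨rfl, rfl⟩ | ⟨rfl, rfl⟩) <;> omega

-- Closed form for A's inner loop over a flat list of directed edges, with a ghost
-- nodup list T of the normalized edges already recorded in the set S.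
lemma pvAloop_closed (es : List (Int × Int)) :
    ∀ (S : PySem.Set (Int × Int)) (c : Int) (T : List (Int × Int)),
    T.Nodup → (∀ e, e ∈ S ↔ pvNorm e ∈ T) →
    (es.foldl pvAstep (S, c)).2
      = c + es.length
        - ((((es.map pvNorm).foldl PySem.Set.add T).length : Int) - (T.length : Int)) := by
  induction es with
  | nil => intro S c T _ _; simp
  | cons e es ih =>
    intro S c T hnd hinv
    simp only [List.foldl_cons, List.map_cons]
    by_cases hc : e ∈ S
    · have hT : pvNorm e ∈ T := (hinv e).mp hc
      rw [show pvAstep (S, c) e = (S, c + 1) by simp [pvAstep, hc]]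
      rw [PySem.Set.add_of_mem hT]
      rw [ih S (c + 1) T hnd hinv]
      simp only [List.length_cons]
      push_cast
      omega
    · have hT : pvNorm e ∉ T := fun h => hc ((hinv e).mpr h)
      rw [show pvAstep (S, c) e
            = (PySem.Set.add (PySem.Set.add S e) (e.2, e.1), c) by
        simp [pvAstep, hc]]
      rw [PySem.Set.add_of_not_mem hT]
      have hnd' : (T ++ [pvNorm e]).Nodup :=
        hnd.append (List.nodup_singleton _) (by simpa using hT)
      have hinv' : ∀ e', e' ∈ PySem.Set.add (PySem.Set.add S e) (e.2, e.1)
          ↔ pvNorm e' ∈ T ++ [pvNorm e] := by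
        intro e'
        rw [PySem.Set.mem_add, PySem.Set.mem_add]
        rw [List.mem_append, List.mem_singleton, hinv e', pvNorm_eq_iff]
        tauto
      rw [ih _ c (T ++ [pvNorm e]) hnd' hinv']
      simp only [List.length_cons, List.length_append, List.length_nil]
      push_cast
      omega

-- Adding 1 at exactly one element of a nodup list adds 1 to the mapped sum.
lemma pvSum_bump {α : Type} [BEq α] [LawfulBEq α] (L : List α) (x : α) (f : α → Int)
    (hL : L.Nodup) (hx : x ∈ L) :
    (L.map (fun k => f k + if x == k then 1 else 0)).sum = (L.map f).sum + 1 := by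
  induction L with
  | nil => simp at hx
  | cons a L ih =>
    rcases List.mem_cons.mp hx with rfl | hxL
    · have hcg : ∀ k ∈ L, f k + (if x == k then (1 : Int) else 0) = f k := by
        intro k hk
        have : x ≠ k := fun h => (List.nodup_cons.mp hL).1 (h ▸ hk)
        simp [this]
      simp [List.map_congr_left hcg]
      ring
    · have hax : x ≠ a := fun h => (List.nodup_cons.mp hL).1 (h ▸ hxL)
      simp [hax, ih (List.nodup_cons.mp hL).2 hxL]
      ring

-- Sum of the multiplicities of the distinct elements is the length.
lemma pvSum_counts {α : Type} [BEq α] [LawfulBEq α] (ns : List α) :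
    ((PySem.Set.ofList ns).map (fun k => (ns.count k : Int))).sum = (ns.length : Int) := by
  induction ns using List.reverseRecOn with
  | nil => simp
  | append_singleton ns x ih =>
    rw [PySem.Set.ofList_append_singleton]
    have hcg : ∀ k ∈ PySem.Set.ofList ns,
        (((ns ++ [x]).count k : Nat) : Int) = (ns.count k : Int) + (if x == k then 1 else 0) := by
      intro k _
      rw [List.count_append, List.count_singleton]
      rcases eq_or_ne x k with rfl | hne
      · simp
      · simp [hne]
    by_cases hx : x ∈ ns
    · rw [PySem.Set.add_of_mem (by simpa [PySem.Set.mem_ofList] using hx),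
          List.map_congr_left hcg,
          pvSum_bump (PySem.Set.ofList ns) x _ (PySem.Set.nodup_ofList ns)
            (by simpa [PySem.Set.mem_ofList] using hx), ih]
      simp [List.length_append]
    · rw [PySem.Set.add_of_not_mem (by simpa [PySem.Set.mem_ofList] using hx),
          List.map_append, List.sum_append, List.map_congr_left hcg]
      have hbump0 : ∀ k ∈ PySem.Set.ofList ns,
          (ns.count k : Int) + (if x == k then 1 else 0) = (ns.count k : Int) := by
        intro k hk
        have : x ≠ k := fun h => hx (h ▸ (PySem.Set.mem_ofList ns k).mp hk)
        simp [this]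
      rw [List.map_congr_left hbump0, ih]
      simp [List.length_append, List.count_append, List.count_eq_zero.mpr hx]

-- B's nested loop builds Counter(normalized edges) of the flattened edge list.
lemma pvBdict_eq (paths : List (List Int)) :
    paths.foldl (fun (d : PySem.Dict (Int × Int) Int) path =>
        (path.zip (path.drop 1)).foldl (fun d uv =>
          d.insert (pvNorm uv) (d.getD (pvNorm uv) 0 + 1)) d)
      PySem.Dict.empty
    = PySem.Dict.counter ((paths.flatMap (fun p => p.zip (p.drop 1))).map pvNorm) := by
  rw [← PySem.Dict.foldl_insert_getD_add_one_eq_counter, List.foldl_map, List.foldl_flatMap]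

-- ===== VERDICT (by name: the statement is the Claim_ definition above) =====
theorem count_common_edges_spec : Claim_equal_count_common_edges := by
  intro paths _
  show count_common_edges paths = count_common_edges_alt paths
  unfold count_common_edges count_common_edges_alt
  -- rewrite A's index loops as folds over the consecutive-pair lists, then flatten both sides
  have hA : ∀ (st : PySem.Set (Int × Int) × Int) (path : List Int),
      (PySem.List.pyRange 0 ((path.length : Int) - 1) 1).foldl (fun st i =>
        if st.1.contains (PySem.List.pyGetD path i 0, PySem.List.pyGetD path (i + 1) 0) then
          (st.1, st.2 + 1)
        else
          (PySem.Set.add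
             (PySem.Set.add st.1 (PySem.List.pyGetD path i 0, PySem.List.pyGetD path (i + 1) 0))
             (PySem.List.pyGetD path (i + 1) 0, PySem.List.pyGetD path i 0),
           st.2)) st
      = (path.zip (path.drop 1)).foldl pvAstep st := by
    intro st path
    rw [← pvPairs_eq path, List.foldl_map]
    rfl
  simp only [hA, pvBdict_eq]
  rw [show List.foldl (fun st path => List.foldl pvAstep st (path.zip (List.drop 1 path)))
        (PySem.Set.empty, (0 : Int)) paths
      = List.foldl pvAstep (PySem.Set.empty, (0 : Int))
          (paths.flatMap (fun p => p.zip (p.drop 1))) from (List.foldl_flatMap).symm]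
  set es := paths.flatMap (fun p => p.zip (p.drop 1)) with hes
  rw [pvAloop_closed es PySem.Set.empty 0 [] List.nodup_nil (by simp [PySem.Set.empty])]
  rw [← PySem.Set.ofList_eq_foldl]
  set ns := es.map pvNorm with hns
  have hvals : (PySem.Dict.counter ns).values
      = (PySem.Set.ofList ns).map (fun k => (ns.count k : Int)) := by
    show ((PySem.Dict.counter ns).items).map (·.2) = _
    rw [PySem.Dict.items_counter]
    simp [List.map_map, Function.comp]
  have hsize : ((PySem.Dict.counter ns).size : Int) = ((PySem.Set.ofList ns).length : Int) := by
    show (((PySem.Dict.counter ns).items).length : Int) = _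
    rw [PySem.Dict.items_counter]
    simp
  rw [hvals, hsize, pvSum_counts]
  simp only [hns, List.length_map, List.length_nil]
  omega
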